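-- pv_equiv track=rewrite | github.com/bashtavenko/py_snippets | misc/spikes.py | find_spikes
-- ===== SOURCE A (Python) =====
-- def find_spikes(data):
--     sizes = []
--
--     if len(data) < 2:
--         return []
--
--     count = 1
--     started = False
--     for i in range(1, len(data)):
--         if data[i] > data[i - 1]:
--             started = True
--             count += 1
--         elif count > 1:
--             sizes.append(count)
--             count = 1
--             started = False
--
--     if i==len(data) - 1 and started:
--         sizes.append(count)
--
--     return sizes
-- ===== SOURCE B (Python) =====
-- def find_spikes(data):
--     n = len(data)
--     bounds = [0] + [i for i in range(1, n) if data[i] <= data[i - 1]] + [n]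
--     return [b - a for a, b in zip(bounds, bounds[1:]) if b - a >= 2]
-- ===== Notes on version B (the rewrite author's own statement) =====
-- stated objective: alternative
-- what changed: B replaces A's stateful single pass (running count + started flag + post-loop flush) by a segmentation: it collects the break indices where data[i] <= data[i-1], forms boundary list [0]+breaks+[n], and emits each consecutive boundary difference that is >= 2.
import Mathlib
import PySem

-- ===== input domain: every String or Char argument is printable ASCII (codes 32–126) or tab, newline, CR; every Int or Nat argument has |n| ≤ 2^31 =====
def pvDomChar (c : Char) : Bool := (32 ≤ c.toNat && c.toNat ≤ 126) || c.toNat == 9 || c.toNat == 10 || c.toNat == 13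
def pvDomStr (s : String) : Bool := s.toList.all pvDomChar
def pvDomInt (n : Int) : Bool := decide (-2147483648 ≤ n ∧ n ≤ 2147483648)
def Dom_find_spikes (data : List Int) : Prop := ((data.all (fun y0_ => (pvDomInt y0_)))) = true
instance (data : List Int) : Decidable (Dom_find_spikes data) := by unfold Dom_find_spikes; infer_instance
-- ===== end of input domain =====

-- B segments the sequence at break positions instead of A's running count/flag pass; same O(n) cost, different decomposition.
-- ===== PORT A =====
-- State of A's loop: (sizes, count, started).  Python's loop variable i after
-- 'for i in range(1, len(data))' retains its last value n-1 (the range is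
-- nonempty because the guard ensured len(data) >= 2), so it is bound as n-1 here.
def find_spikes (data : List Int) : List Int :=
  if data.length < 2 then []
  else
    let n : Int := data.length
    let r := (PySem.List.pyRange 1 n 1).foldl
      (fun (st : List Int × Int × Bool) i =>
        if PySem.List.pyGetD data i 0 > PySem.List.pyGetD data (i - 1) 0 then
          (st.1, st.2.1 + 1, true)
        else if st.2.1 > 1 then
          (st.1 ++ [st.2.1], 1, false)
        else st)
      ([], 1, false)
    let i := n - 1
    if i = n - 1 ∧ r.2.2 = true then r.1 ++ [r.2.1] else r.1

-- ===== PORT B =====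
def find_spikes_alt (data : List Int) : List Int :=
  let n : Int := data.length
  let bounds := [(0 : Int)] ++ (PySem.List.pyRange 1 n 1).filter
      (fun i => decide (PySem.List.pyGetD data i 0 ≤ PySem.List.pyGetD data (i - 1) 0)) ++ [n]
  ((bounds.zip bounds.tail).filter (fun q => decide (q.2 - q.1 ≥ 2))).map (fun q => q.2 - q.1)

-- ===== PRECONDITION & SPEC =====
def Spec_find_spikes (data : List Int) (out : List Int) : Prop := out = find_spikes_alt data
instance (data : List Int) (out : List Int) : Decidable (Spec_find_spikes data out) := by unfold Spec_find_spikes; infer_instance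

-- ===== CLAIM (what is proved, stated in full; the proofs are below) =====
def Claim_equal_find_spikes : Prop := ∀ (data : List Int), Dom_find_spikes data → Spec_find_spikes data (find_spikes data)

-- ===== LEMMAS AND PROOFS =====

-- A's loop body, named for the proofs (definitionally the lambda in the port).
def stepA (data : List Int) (st : List Int × Int × Bool) (i : Int) : List Int × Int × Bool :=
  if PySem.List.pyGetD data i 0 > PySem.List.pyGetD data (i - 1) 0 then
    (st.1, st.2.1 + 1, true)
  else if st.2.1 > 1 then
    (st.1 ++ [st.2.1], 1, false)
  else st

-- B's break predicate, named for the proofs.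
def brkB (data : List Int) (i : Int) : Bool :=
  decide (PySem.List.pyGetD data i 0 ≤ PySem.List.pyGetD data (i - 1) 0)

-- B's "consecutive differences that are ≥ 2", named for the proofs.
def diffs (l : List Int) : List Int :=
  ((l.zip l.tail).filter (fun q => decide (q.2 - q.1 ≥ 2))).map (fun q => q.2 - q.1)

lemma diffs_cons_cons (x y : Int) (l : List Int) :
    diffs (x :: y :: l) = (if y - x ≥ 2 then [y - x] else []) ++ diffs (y :: l) := by
  by_cases h : y - x ≥ 2 <;>
    simp [diffs, h]

-- The main invariant: running A's loop from index a with previous boundary p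
-- (current count a - p, started iff count > 1) and flushing at the end produces
-- exactly the ≥2 differences of the boundary list p :: breaks ++ [length].
lemma main_inv (data : List Int) :
    ∀ (k : Nat) (a p : Int) (sizes : List Int),
      a + k = data.length → 1 ≤ a → p ≤ a - 1 →
      (let r := (PySem.List.pyRange a (data.length) 1).foldl (stepA data) (sizes, a - p, decide (a - p > 1));
        if r.2.2 = true then r.1 ++ [r.2.1] else r.1)
      = sizes ++ diffs (p :: (PySem.List.pyRange a (data.length) 1).filter (brkB data) ++ [(data.length : Int)]) := by
  intro k
  induction k with
  | zero =>
    intro a p sizes hk h1 h3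
    have ha : a = (data.length : Int) := by push_cast at hk; omega
    subst ha
    rw [PySem.List.pyRange_one_eq_nil (le_refl _)]
    by_cases hc : (data.length : Int) - p > 1
    · simp [diffs, hc, show (data.length : Int) - p ≥ 2 by omega]
    · simp [diffs, hc, show ¬ ((data.length : Int) - p ≥ 2) by omega]
  | succ k ih =>
    intro a p sizes hk h1 h3
    have hab : a < (data.length : Int) := by push_cast at hk; omega
    rw [PySem.List.pyRange_one_cons hab]
    simp only [List.foldl_cons, List.filter_cons]
    by_cases hinc : PySem.List.pyGetD data a 0 > PySem.List.pyGetD data (a - 1) 0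
    · have hb : brkB data a = false := by simp [brkB]; omega
      have hstep : stepA data (sizes, a - p, decide (a - p > 1)) a = (sizes, a - p + 1, true) := by
        simp [stepA, hinc]
      rw [hb, hstep]
      simp only [Bool.false_eq_true, if_false]
      have H := ih (a + 1) p sizes (by push_cast at hk ⊢; omega) (by omega) (by omega)
      rw [show a + 1 - p = a - p + 1 by ring] at H
      rw [show decide (a - p + 1 > 1) = true by simp only [decide_eq_true_eq]; omega] at H
      exact H
    · have hb : brkB data a = true := by simp [brkB]; omega
      rw [hb]
      simp only [if_true, List.cons_append]
      by_cases hc : a - p > 1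
      · have hstep : stepA data (sizes, a - p, decide (a - p > 1)) a = (sizes ++ [a - p], 1, false) := by
          simp [stepA, hinc, hc]
        rw [hstep]
        have H := ih (a + 1) a (sizes ++ [a - p]) (by push_cast at hk ⊢; omega) (by omega) (by omega)
        rw [show a + 1 - a = 1 by ring] at H
        rw [show decide ((1 : Int) > 1) = false from rfl] at H
        rw [diffs_cons_cons p a, if_pos (by omega : a - p ≥ 2)]
        rw [H]
        simp
      · have hs1 : a - p = 1 := by omega
        have hstep : stepA data (sizes, a - p, decide (a - p > 1)) a = (sizes, a - p, decide (a - p > 1)) := by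
          simp [stepA, hinc, hc]
        rw [hstep, hs1]
        have H := ih (a + 1) a sizes (by push_cast at hk ⊢; omega) (by omega) (by omega)
        rw [show a + 1 - a = 1 by ring] at H
        rw [diffs_cons_cons p a, if_neg (by omega : ¬ a - p ≥ 2)]
        exact H

-- Port A with its guard discharged and its loop body named (definitional).
lemma find_spikes_eq (data : List Int) (h : ¬ data.length < 2) :
    find_spikes data =
      (let r := (PySem.List.pyRange 1 (data.length) 1).foldl (stepA data) ([], 1, false);
       if ((data.length : Int) - 1 = (data.length : Int) - 1 ∧ r.2.2 = true) then r.1 ++ [r.2.1]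
       else r.1) := by
  unfold find_spikes stepA
  rw [if_neg h]

-- Port B re-expressed through the named helpers (definitional).
lemma find_spikes_alt_eq (data : List Int) :
    find_spikes_alt data =
      diffs ((0 : Int) :: (PySem.List.pyRange 1 (data.length) 1).filter (brkB data)
              ++ [(data.length : Int)]) := rfl

theorem find_spikes_spec : Claim_equal_find_spikes := by
  intro data _
  unfold Spec_find_spikes
  by_cases hlen : data.length < 2
  · match data, hlen with
    | [], _ => rfl
    | [x], _ => rfl
    | (x :: y :: t), h => simp at h
  · have H := main_inv data (data.length - 1) 1 0 []
      (by push_cast [Nat.cast_sub (show 1 ≤ data.length by omega)]; ring) (le_refl 1) (by norm_num)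
    simp only [sub_zero] at H
    rw [show decide ((1 : Int) > 1) = false from rfl] at H
    rw [find_spikes_eq data hlen, find_spikes_alt_eq data]
    simp only [true_and]
    simpa using H
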